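-- pv_equiv track=rewrite | github.com/shikgom2/boj | 27726_2.py | solve
-- ===== SOURCE A (Python) =====
-- from collections import defaultdict
--
-- class UnionFind:
--     def __init__(self, n):
--         self.parent = list(range(n))
--         self.rank = [0] * n
--
--     def find(self, a):
--         if self.parent[a] != a:
--             self.parent[a] = self.find(self.parent[a])
--         return self.parent[a]
--
--     def union(self, a, b):
--         rootA = self.find(a)
--         rootB = self.find(b)
--
--         if rootA != rootB:
--             if self.rank[rootA] > self.rank[rootB]:
--                 self.parent[rootB] = rootA
--             elif self.rank[rootA] < self.rank[rootB]:
--                 self.parent[rootA] = rootB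
--             else:
--                 self.parent[rootB] = rootA
--                 self.rank[rootA] += 1
--
-- def dsu(n, edges):
--     uf = UnionFind(n)
--     for a, b in edges:
--         uf.union(a - 1, b - 1)
--     return [uf.find(i) for i in range(n)]
--
-- def solve(n, edges1, edges2, edges3):
--     comp1 = dsu(n, edges1)
--     comp2 = dsu(n, edges2)
--     comp3 = dsu(n, edges3)
--
--     for i in range(len(comp1)):
--         comp1[i] += 1
--
--     for i in range(len(comp2)):
--         comp2[i] += 1
--
--     for i in range(len(comp3)):
--         comp3[i] += 1
--
--     li = defaultdict(list)
--     for i in range(n):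
--         tuple_key = (comp1[i], comp2[i], comp3[i])
--         li[tuple_key].append(i + 1)
--
--     awesome = []
--     for group in li.values():
--         if len(group) > 1:
--             s = sorted(group)
--             awesome.append(s)
--
--     awesome.sort(key=lambda x : x[0])
--     return awesome
-- ===== SOURCE B (Python) =====
-- def dsu(n, edges):
--     # union-find with union by rank and path compression (same helper as the original module)
--     parent = list(range(n))
--     rank = [0] * n
--
--     def find(a):
--         if parent[a] != a:
--             parent[a] = find(parent[a])
--         return parent[a]
--
--     def union(a, b):
--         rootA = find(a)
--         rootB = find(b)
--         if rootA != rootB: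
--             if rank[rootA] > rank[rootB]:
--                 parent[rootB] = rootA
--             elif rank[rootA] < rank[rootB]:
--                 parent[rootA] = rootB
--             else:
--                 parent[rootB] = rootA
--                 rank[rootA] += 1
--
--     for a, b in edges:
--         union(a - 1, b - 1)
--     return [find(i) for i in range(n)]
--
--
-- def solve(n, edges1, edges2, edges3):
--     comp1 = dsu(n, edges1)
--     comp2 = dsu(n, edges2)
--     comp3 = dsu(n, edges3)
--
--     # radix-style composite key: components are in [0, n), so this integer
--     # encodes the triple (comp1[i], comp2[i], comp3[i]) injectively
--     enc = [(comp1[i] * n + comp2[i]) * n + comp3[i] for i in range(n)]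
--
--     # stable sort keeps nodes ascending within equal keys
--     order = sorted(range(n), key=lambda i: enc[i])
--
--     groups = []
--     run = []
--     prev = None
--     for i in order:
--         if prev is not None and enc[i] == prev:
--             run.append(i + 1)
--         else:
--             if len(run) > 1:
--                 groups.append(run)
--             run = [i + 1]
--             prev = enc[i]
--     if len(run) > 1:
--         groups.append(run)
--
--     groups.sort(key=lambda g: g[0])
--     return groups
-- ===== Notes on version B (the rewrite author's own statement) =====
-- stated objective: alternative
-- what changed: The defaultdict grouping of equal component-triples (plus per-group sort and final sort) is replaced by encoding each triple as a single integer radix-n key, stably sorting the node indices by that key, and collecting maximal equal-key runs in one scan; the union-find component computation is the shared module helper in both.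
import Mathlib
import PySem

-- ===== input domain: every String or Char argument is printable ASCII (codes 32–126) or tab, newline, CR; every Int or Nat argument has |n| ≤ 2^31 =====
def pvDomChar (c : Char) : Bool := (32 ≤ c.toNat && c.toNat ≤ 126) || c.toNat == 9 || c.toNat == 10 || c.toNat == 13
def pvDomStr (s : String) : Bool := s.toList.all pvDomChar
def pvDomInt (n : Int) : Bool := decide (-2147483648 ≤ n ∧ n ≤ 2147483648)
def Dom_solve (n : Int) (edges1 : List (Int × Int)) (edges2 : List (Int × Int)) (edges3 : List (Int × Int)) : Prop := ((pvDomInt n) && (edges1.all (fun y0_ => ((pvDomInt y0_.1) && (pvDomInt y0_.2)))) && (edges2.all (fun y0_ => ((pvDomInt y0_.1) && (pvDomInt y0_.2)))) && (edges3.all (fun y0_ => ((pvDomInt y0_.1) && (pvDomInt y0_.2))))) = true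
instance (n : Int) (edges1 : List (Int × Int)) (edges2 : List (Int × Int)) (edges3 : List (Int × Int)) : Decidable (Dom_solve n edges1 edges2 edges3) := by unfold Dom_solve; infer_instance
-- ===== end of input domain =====

-- B replaces A's defaultdict grouping of equal component-triples by an integer-encoded
-- key, a stable sort of the node indices by that key and a single run-collecting scan
-- (objective: alternative decomposition of the grouping phase; the union-find helper is
-- the same shared module helper in both programs).

-- ===== PORT A =====
-- shared helper `dsu` (identical in Source A and Source B): union-find with union by rank and
-- recursive path compression; the recursion is run with fuel `parent.length + 1`, which
-- is an upper bound on any parent-chain length, so the fuel never runs out where the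
-- Python recursion terminates.
def ufFind : Nat → List Int → Int → List Int × Int
  | 0, parent, a => (parent, PySem.List.pyGetD parent a 0)
  | fuel + 1, parent, a =>
    let pa := PySem.List.pyGetD parent a 0
    if pa ≠ a then
      let r := ufFind fuel parent pa
      (PySem.List.pySetD r.1 a r.2, r.2)
    else (parent, pa)

def ufUnion (st : List Int × List Int) (a b : Int) : List Int × List Int :=
  let f1 := ufFind (st.1.length + 1) st.1 a
  let rootA := f1.2
  let f2 := ufFind (f1.1.length + 1) f1.1 b
  let rootB := f2.2
  let p := f2.1
  let rank := st.2
  if rootA ≠ rootB then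
    if PySem.List.pyGetD rank rootA 0 > PySem.List.pyGetD rank rootB 0 then
      (PySem.List.pySetD p rootB rootA, rank)
    else if PySem.List.pyGetD rank rootA 0 < PySem.List.pyGetD rank rootB 0 then
      (PySem.List.pySetD p rootA rootB, rank)
    else
      (PySem.List.pySetD p rootB rootA,
       PySem.List.pySetD rank rootA (PySem.List.pyGetD rank rootA 0 + 1))
  else (p, rank)

def dsu (n : Int) (edges : List (Int × Int)) : List Int :=
  let parent := PySem.List.pyRange 0 n 1
  let rank := List.replicate n.toNat (0 : Int)
  let st := edges.foldl (fun st e => ufUnion st (e.1 - 1) (e.2 - 1)) (parent, rank)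
  -- [uf.find(i) for i in range(n)] threads the path-compression state left to right
  (((PySem.List.pyRange 0 n 1).foldl
      (fun (acc : List Int × List Int) i =>
        let f := ufFind (acc.1.length + 1) acc.1 i
        (f.1, acc.2 ++ [f.2])) (st.1, []))).2

def solve (n : Int) (edges1 : List (Int × Int)) (edges2 : List (Int × Int)) (edges3 : List (Int × Int)) : List (List Int) :=
  let comp1 := (dsu n edges1).map (· + 1)
  let comp2 := (dsu n edges2).map (· + 1)
  let comp3 := (dsu n edges3).map (· + 1)
  let li := (PySem.List.pyRange 0 n 1).foldl
    (fun (d : PySem.Dict (Int × Int × Int) (List Int)) i =>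
      d.modify (PySem.List.pyGetD comp1 i 0, PySem.List.pyGetD comp2 i 0,
                PySem.List.pyGetD comp3 i 0) [] (· ++ [i + 1]))
    PySem.Dict.empty
  let awesome := li.values.foldl
    (fun acc g => if g.length > 1 then acc ++ [PySem.List.sorted g (fun x => x)] else acc) []
  PySem.List.sorted awesome (fun g => PySem.List.pyGetD g 0 0)

-- ===== PORT B =====
-- scan step of Source B's run-collecting loop (state: groups so far, current run, previous key)
def scanStep (enc : List Int) (st : List (List Int) × List Int × Option Int) (i : Int) :
    List (List Int) × List Int × Option Int :=
  let e := PySem.List.pyGetD enc i 0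
  match st.2.2 with
  | some p =>
    if e = p then (st.1, st.2.1 ++ [i + 1], some p)
    else ((if st.2.1.length > 1 then st.1 ++ [st.2.1] else st.1), [i + 1], some e)
  | none => ((if st.2.1.length > 1 then st.1 ++ [st.2.1] else st.1), [i + 1], some e)

def solve_alt (n : Int) (edges1 : List (Int × Int)) (edges2 : List (Int × Int)) (edges3 : List (Int × Int)) : List (List Int) :=
  let comp1 := dsu n edges1
  let comp2 := dsu n edges2
  let comp3 := dsu n edges3
  let enc := (PySem.List.pyRange 0 n 1).map
    (fun i => (PySem.List.pyGetD comp1 i 0 * n + PySem.List.pyGetD comp2 i 0) * n +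
              PySem.List.pyGetD comp3 i 0)
  let order := PySem.List.sorted (PySem.List.pyRange 0 n 1) (fun i => PySem.List.pyGetD enc i 0)
  let fin := order.foldl (scanStep enc) ([], [], none)
  let groups := if fin.2.1.length > 1 then fin.1 ++ [fin.2.1] else fin.1
  PySem.List.sorted groups (fun g => PySem.List.pyGetD g 0 0)

-- ===== PRECONDITION & SPEC =====
-- Pre_ excludes exactly the inputs on which Python A raises an IndexError: an edge
-- endpoint a with a-1 outside the valid (negative indices included) range of the
-- length-max(n,0) parent list.
def Pre_solve (n : Int) (edges1 : List (Int × Int)) (edges2 : List (Int × Int)) (edges3 : List (Int × Int)) : Prop :=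
  ((edges1 ++ edges2 ++ edges3).all
    (fun p => decide (1 - n ≤ p.1 ∧ p.1 ≤ n ∧ 1 - n ≤ p.2 ∧ p.2 ≤ n))) = true
instance (n : Int) (edges1 : List (Int × Int)) (edges2 : List (Int × Int)) (edges3 : List (Int × Int)) : Decidable (Pre_solve n edges1 edges2 edges3) := by unfold Pre_solve; infer_instance

def pvWitness_solve : Int × (List (Int × Int)) × (List (Int × Int)) × (List (Int × Int)) :=
  (4, [(1, 2), (3, 4)], [(2, 1), (4, 3)], [(1, 2)])

def Spec_solve (n : Int) (edges1 : List (Int × Int)) (edges2 : List (Int × Int)) (edges3 : List (Int × Int)) (out : List (List Int)) : Prop := out = solve_alt n edges1 edges2 edges3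
instance (n : Int) (edges1 : List (Int × Int)) (edges2 : List (Int × Int)) (edges3 : List (Int × Int)) (out : List (List Int)) : Decidable (Spec_solve n edges1 edges2 edges3 out) := by unfold Spec_solve; infer_instance

-- ===== CLAIM (what is proved, stated in full; the proofs are below) =====
def Claim_equal_solve : Prop := ∀ (n : Int) (edges1 : List (Int × Int)) (edges2 : List (Int × Int)) (edges3 : List (Int × Int)), Dom_solve n edges1 edges2 edges3 → Pre_solve n edges1 edges2 edges3 → Spec_solve n edges1 edges2 edges3 (solve n edges1 edges2 edges3)

-- ===== LEMMAS AND PROOFS =====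

theorem mem_pyGetD (xs : List Int) (i d : Int) :
    PySem.List.pyGetD xs i d ∈ xs ∨ PySem.List.pyGetD xs i d = d := by
  unfold PySem.List.pyGetD
  cases h : PySem.List.pyGet? xs i with
  | none => right; rfl
  | some x =>
    left
    simp only [Option.getD_some]
    exact PySem.List.mem_of_pyGet?_eq_some xs h

theorem mem_pySetD {x v : Int} (xs : List Int) (i : Int)
    (h : x ∈ PySem.List.pySetD xs i v) : x ∈ xs ∨ x = v := by
  unfold PySem.List.pySetD PySem.List.pySet? at h
  cases hk : PySem.List.pyIdx? xs.length i with
  | none => rw [hk] at h; simp at h; exact Or.inl h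
  | some k => rw [hk] at h; simp at h; exact List.mem_or_eq_of_mem_set h

def Bnd (N : Nat) (p : List Int) : Prop :=
  p.length = N ∧ ∀ x ∈ p, 0 ≤ x ∧ x < (N : Int)

theorem Bnd_pySetD {N : Nat} {p : List Int} {i v : Int} (h : Bnd N p)
    (hv : 0 ≤ v ∧ v < (N : Int)) : Bnd N (PySem.List.pySetD p i v) := by
  refine ⟨by rw [PySem.List.length_pySetD]; exact h.1, fun x hx => ?_⟩
  rcases mem_pySetD p i hx with hm | hm
  · exact h.2 _ hm
  · subst hm; exact hv

theorem ufFind_succ (fuel : Nat) (p : List Int) (a : Int) :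
    ufFind (fuel + 1) p a =
      if PySem.List.pyGetD p a 0 ≠ a
      then (PySem.List.pySetD (ufFind fuel p (PySem.List.pyGetD p a 0)).1 a
              (ufFind fuel p (PySem.List.pyGetD p a 0)).2,
            (ufFind fuel p (PySem.List.pyGetD p a 0)).2)
      else (p, PySem.List.pyGetD p a 0) := rfl

theorem ufFind_bnd (N : Nat) (hN : 1 ≤ N) :
    ∀ (fuel : Nat) (p : List Int) (a : Int), Bnd N p →
      Bnd N (ufFind fuel p a).1 ∧ 0 ≤ (ufFind fuel p a).2 ∧ (ufFind fuel p a).2 < (N : Int) := by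
  have hbase : ∀ (p : List Int) (a : Int), Bnd N p →
      0 ≤ PySem.List.pyGetD p a 0 ∧ PySem.List.pyGetD p a 0 < (N : Int) := by
    intro p a hp
    rcases mem_pyGetD p a 0 with h | h
    · exact hp.2 _ h
    · rw [h]; omega
  intro fuel
  induction fuel with
  | zero => intro p a hp; exact ⟨hp, hbase p a hp⟩
  | succ fuel ih =>
    intro p a hp
    rw [ufFind_succ]
    by_cases hpa : PySem.List.pyGetD p a 0 ≠ a
    · rw [if_pos hpa]
      have ih' := ih p (PySem.List.pyGetD p a 0) hp
      exact ⟨Bnd_pySetD ih'.1 ih'.2, ih'.2⟩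
    · rw [if_neg hpa]
      exact ⟨hp, hbase p a hp⟩

theorem ufUnion_bnd (N : Nat) (hN : 1 ≤ N) (st : List Int × List Int) (a b : Int)
    (h : Bnd N st.1) : Bnd N (ufUnion st a b).1 := by
  have h1 := ufFind_bnd N hN (st.1.length + 1) st.1 a h
  have h2 := ufFind_bnd N hN ((ufFind (st.1.length + 1) st.1 a).1.length + 1)
    (ufFind (st.1.length + 1) st.1 a).1 b h1.1
  unfold ufUnion
  dsimp only
  split_ifs with h0 hr1 hr2 <;>
    first
      | exact Bnd_pySetD h2.1 ⟨h1.2.1, h1.2.2⟩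
      | exact Bnd_pySetD h2.1 ⟨h2.2.1, h2.2.2⟩
      | exact h2.1

set_option maxHeartbeats 4000000 in
theorem dsu_bnd (N : Nat) (hN : 1 ≤ N) (edges : List (Int × Int)) :
    (dsu (N : Int) edges).length = N ∧ ∀ x ∈ dsu (N : Int) edges, 0 ≤ x ∧ x < (N : Int) := by
  have hinit : Bnd N (PySem.List.pyRange 0 (N : Int) 1) := by
    rw [PySem.List.pyRange_zero_natCast]
    refine ⟨by simp, fun x hx => ?_⟩
    simp only [List.mem_map, List.mem_range] at hx
    obtain ⟨k, hk, rfl⟩ := hx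
    exact ⟨by omega, by omega⟩
  have hfold : ∀ (es : List (Int × Int)) (st : List Int × List Int), Bnd N st.1 →
      Bnd N (es.foldl (fun st e => ufUnion st (e.1 - 1) (e.2 - 1)) st).1 := by
    intro es
    induction es with
    | nil => intro st h; exact h
    | cons e es ih => intro st h; exact ih _ (ufUnion_bnd N hN st _ _ h)
  have hcomp : ∀ (l : List Int) (p out : List Int), Bnd N p →
      (∀ x ∈ out, 0 ≤ x ∧ x < (N : Int)) →
      ((l.foldl (fun (acc : List Int × List Int) i =>
          let f := ufFind (acc.1.length + 1) acc.1 i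
          (f.1, acc.2 ++ [f.2])) (p, out)).2).length = out.length + l.length ∧
      ∀ x ∈ (l.foldl (fun (acc : List Int × List Int) i =>
          let f := ufFind (acc.1.length + 1) acc.1 i
          (f.1, acc.2 ++ [f.2])) (p, out)).2, 0 ≤ x ∧ x < (N : Int) := by
    intro l
    induction l with
    | nil => intro p out h1 h2; exact ⟨by simp, h2⟩
    | cons i l ih =>
      intro p out h1 h2
      have hf := ufFind_bnd N hN (p.length + 1) p i h1
      have hih := ih (ufFind (p.length + 1) p i).1 (out ++ [(ufFind (p.length + 1) p i).2]) hf.1 (by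
        intro x hx
        rcases List.mem_append.mp hx with hm | hm
        · exact h2 _ hm
        · simp at hm; subst hm; exact hf.2)
      rw [List.foldl_cons]
      dsimp only
      refine ⟨?_, hih.2⟩
      rw [hih.1]
      simp
      omega
  have hst := hfold edges (PySem.List.pyRange 0 (N : Int) 1,
      List.replicate (N : Int).toNat (0 : Int)) hinit
  have hmain := hcomp (PySem.List.pyRange 0 (N : Int) 1)
      (edges.foldl (fun st e => ufUnion st (e.1 - 1) (e.2 - 1))
        (PySem.List.pyRange 0 (N : Int) 1, List.replicate (N : Int).toNat (0 : Int))).1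
      ([] : List Int) hst (fun x hx => nomatch hx)
  simp only [dsu]
  constructor
  · rw [hmain.1]
    rw [PySem.List.pyRange_zero_natCast]
    simp
  · exact hmain.2

theorem cancel_digit (n x x' y y' : Int) (hn : 0 < n) (h0 : 0 ≤ y) (h1 : y < n)
    (h2 : 0 ≤ y') (h3 : y' < n) (h : x * n + y = x' * n + y') : x = x' ∧ y = y' := by
  have hd : (x - x') * n = y' - y := by ring_nf; linarith
  have hx : x = x' := by
    rcases lt_trichotomy x x' with hlt | he | hgt
    · have hxx : x - x' ≤ -1 := by omega
      have := mul_le_mul_of_nonneg_right hxx hn.le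
      linarith
    · exact he
    · have hxx : (1 : Int) ≤ x - x' := by omega
      have := mul_le_mul_of_nonneg_right hxx hn.le
      linarith
  subst hx
  constructor
  · rfl
  · linarith

theorem filter_insertBy {alpha kappa : Type} [LinearOrder kappa] (key : alpha → kappa) (k : kappa) (x : alpha) :
    ∀ s : List alpha, s.Pairwise (fun a b => key a ≤ key b) →
      (PySem.List.insertBy (fun a b => decide (key a < key b)) x s).filter (fun y => decide (key y = k))
        = s.filter (fun y => decide (key y = k)) ++ if key x = k then [x] else [] := by
  intro s
  induction s with
  | nil =>
    intro _
    by_cases hxk : key x = k <;> simp [PySem.List.insertBy, hxk]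
  | cons y ys ih =>
    intro hp
    have hins : PySem.List.insertBy (fun a b => decide (key a < key b)) x (y :: ys)
        = if key x < key y then x :: y :: ys
          else y :: PySem.List.insertBy (fun a b => decide (key a < key b)) x ys := by
      simp [PySem.List.insertBy]
    rw [hins]
    by_cases hb : key x < key y
    · rw [if_pos hb]
      by_cases hxk : key x = k
      · have hall : ∀ z ∈ y :: ys, k < key z := by
          intro z hz
          rcases List.mem_cons.mp hz with rfl | hz
          · rw [← hxk]; exact hb
          · exact lt_of_lt_of_le (hxk ▸ hb) (List.rel_of_pairwise_cons hp hz)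
        have hfe : (y :: ys).filter (fun z => decide (key z = k)) = [] := by
          apply List.filter_eq_nil_iff.mpr
          intro z hz
          simpa using (ne_of_gt (hall z hz))
        rw [List.filter_cons_of_pos (by simpa using hxk), hfe, if_pos hxk]
        rfl
      · rw [List.filter_cons_of_neg (by simpa using hxk), if_neg hxk]
        simp
    · rw [if_neg hb]
      have ihr := ih (List.Pairwise.of_cons hp)
      by_cases hyk : key y = k
      · rw [List.filter_cons_of_pos (by simpa using hyk),
            List.filter_cons_of_pos (by simpa using hyk), ihr]
        simp
      · rw [List.filter_cons_of_neg (by simpa using hyk),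
            List.filter_cons_of_neg (by simpa using hyk), ihr]

theorem sorted_filter_key {alpha kappa : Type} [LinearOrder kappa] (xs : List alpha) (key : alpha → kappa) (k : kappa) :
    (PySem.List.sorted xs key).filter (fun y => decide (key y = k))
      = xs.filter (fun y => decide (key y = k)) := by
  induction xs using List.reverseRecOn with
  | nil => rfl
  | append_singleton pre x ih =>
    have hs : PySem.List.sorted (pre ++ [x]) key
        = PySem.List.insertBy (fun a b => decide (key a < key b)) x (PySem.List.sorted pre key) := by
      rw [PySem.List.sorted_eq_foldl_insertBy, PySem.List.sorted_eq_foldl_insertBy, List.foldl_append]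
      rfl
    rw [hs, filter_insertBy key k x _ (PySem.List.sorted_pairwise pre key), ih, List.filter_append]
    congr 1
    by_cases hxk : key x = k <;> simp [hxk]

def runsOf (e : Int → Int) : List Int → List (List Int)
  | [] => []
  | x :: xs =>
    ((x :: xs).filter (fun y => decide (e y = e x))).map (· + 1)
      :: runsOf e (xs.filter (fun y => decide (e y ≠ e x)))
termination_by l => l.length
decreasing_by
  simp only [List.length_cons, List.length_unattach]
  exact Nat.lt_succ_of_le (le_trans (List.length_filter_le _ _) (by simp))

theorem runsOf_cons (e : Int → Int) (x : Int) (xs : List Int) :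
    runsOf e (x :: xs)
      = ((x :: xs).filter (fun y => decide (e y = e x))).map (· + 1)
          :: runsOf e (xs.filter (fun y => decide (e y ≠ e x))) := by
  rw [runsOf]

theorem runsOf_ind (e : Int → Int) (P : List Int → Prop) (h0 : P [])
    (hstep : ∀ x xs, P (xs.filter (fun y => decide (e y ≠ e x))) → P (x :: xs)) :
    ∀ l, P l := by
  have H : ∀ (m : Nat) (l : List Int), l.length ≤ m → P l := by
    intro m
    induction m with
    | zero =>
      intro l hl
      rw [List.length_eq_zero_iff.mp (Nat.le_zero.mp hl)]
      exact h0
    | succ m ih =>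
      intro l hl
      cases l with
      | nil => exact h0
      | cons x xs =>
        refine hstep x xs (ih _ ?_)
        simp only [List.length_cons] at hl
        exact le_trans (List.length_filter_le _ _) (by omega)
  intro l
  exact H l.length l le_rfl

theorem mem_runsOf (e : Int → Int) : ∀ (l : List Int), ∀ (g : List Int),
    g ∈ runsOf e l ↔ ∃ x ∈ l, g = (l.filter (fun y => decide (e y = e x))).map (· + 1) := by
  refine runsOf_ind e _ (by simp [runsOf]) ?_
  intro x xs ih g
  rw [runsOf_cons]
  constructor
  · intro hmem
    rcases List.mem_cons.mp hmem with rfl | hg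
    · exact ⟨x, by simp, rfl⟩
    · obtain ⟨z, hz, rfl⟩ := (ih _).mp hg
      have hz' := List.mem_filter.mp hz
      have hze : e z ≠ e x := by simpa using hz'.2
      refine ⟨z, List.mem_cons_of_mem _ hz'.1, ?_⟩
      congr 1
      rw [List.filter_filter]
      rw [List.filter_cons_of_neg (by simpa using fun h => hze h.symm)]
      apply List.filter_congr
      intro y _
      by_cases h : e y = e z <;> simp [h, hze]
  · rintro ⟨z, hz, rfl⟩
    rcases List.mem_cons.mp hz with rfl | hz'
    · exact List.mem_cons_self ..
    · by_cases hze : e z = e x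
      · apply List.mem_cons.mpr
        left
        congr 1
        apply List.filter_congr
        intro y _
        simp [hze]
      · apply List.mem_cons.mpr
        right
        apply (ih _).mpr
        refine ⟨z, List.mem_filter.mpr ⟨hz', by simpa using hze⟩, ?_⟩
        congr 1
        rw [List.filter_filter]
        rw [List.filter_cons_of_neg (by simpa using fun h => hze h.symm)]
        apply List.filter_congr
        intro y _
        by_cases h : e y = e z <;> simp [h, hze]

theorem nodup_runsOf (e : Int → Int) : ∀ l : List Int, (runsOf e l).Nodup := by
  refine runsOf_ind e _ (by simp [runsOf]) ?_
  intro x xs ih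
  rw [runsOf_cons]
  refine List.nodup_cons.mpr ⟨?_, ih⟩
  intro hmem
  obtain ⟨z, hz, heq⟩ := (mem_runsOf e _ _).mp hmem
  have hx1 : x + 1 ∈ ((x :: xs).filter (fun y => decide (e y = e x))).map (· + 1) := by
    exact List.mem_map.mpr ⟨x, List.mem_filter.mpr ⟨by simp, by simp⟩, rfl⟩
  rw [heq] at hx1
  obtain ⟨y, hy, hy1⟩ := List.mem_map.mp hx1
  have : y = x := by omega
  subst this
  have := (List.mem_filter.mp (List.mem_filter.mp hy).1).2
  simp at this

theorem scanStep_some (enc : List Int) (gs : List (List Int)) (run : List Int) (p x : Int) :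
    scanStep enc (gs, run, some p) x =
      if PySem.List.pyGetD enc x 0 = p then (gs, run ++ [x + 1], some p)
      else ((if run.length > 1 then gs ++ [run] else gs), [x + 1],
            some (PySem.List.pyGetD enc x 0)) := rfl

set_option maxHeartbeats 1000000 in
theorem scan_run (enc : List Int) :
    ∀ (xs : List Int) (gs : List (List Int)) (run : List Int) (p : Int),
      xs.Pairwise (fun a b => PySem.List.pyGetD enc a 0 ≤ PySem.List.pyGetD enc b 0) →
      (∀ y ∈ xs, p ≤ PySem.List.pyGetD enc y 0) →
      (if (xs.foldl (scanStep enc) (gs, run, some p)).2.1.length > 1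
       then (xs.foldl (scanStep enc) (gs, run, some p)).1
            ++ [(xs.foldl (scanStep enc) (gs, run, some p)).2.1]
       else (xs.foldl (scanStep enc) (gs, run, some p)).1)
      = gs ++ ((run ++ (xs.filter (fun y => decide (PySem.List.pyGetD enc y 0 = p))).map (· + 1))
            :: runsOf (fun i => PySem.List.pyGetD enc i 0)
                 (xs.filter (fun y => decide (PySem.List.pyGetD enc y 0 ≠ p)))).filter
            (fun g => decide (g.length > 1)) := by
  intro xs
  induction xs with
  | nil =>
    intro gs run p _ _
    simp only [List.foldl_nil, List.filter_nil, List.map_nil, List.append_nil, runsOf]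
    by_cases h : run.length > 1
    · simp [h]
    · simp [h]
  | cons x xs ih =>
    intro gs run p hp hb
    have hptail := (List.pairwise_cons.mp hp).2
    rw [List.foldl_cons, scanStep_some]
    by_cases he : PySem.List.pyGetD enc x 0 = p
    · rw [if_pos he]
      rw [ih gs (run ++ [x + 1]) p hptail (fun y hy => hb y (List.mem_cons_of_mem _ hy))]
      have hp1 : (x :: xs).filter (fun y => decide (PySem.List.pyGetD enc y 0 = p))
          = x :: xs.filter (fun y => decide (PySem.List.pyGetD enc y 0 = p)) := by
        rw [List.filter_cons]; simp [he]
      have hp2 : (x :: xs).filter (fun y => decide (PySem.List.pyGetD enc y 0 ≠ p))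
          = xs.filter (fun y => decide (PySem.List.pyGetD enc y 0 ≠ p)) := by
        rw [List.filter_cons]; simp [he]
      rw [hp1, hp2, List.map_cons]
      simp only [List.append_assoc, List.singleton_append]
    · rw [if_neg he]
      have hgex : ∀ y ∈ xs, PySem.List.pyGetD enc x 0 ≤ PySem.List.pyGetD enc y 0 :=
        fun y hy => (List.pairwise_cons.mp hp).1 y hy
      have hlt : p < PySem.List.pyGetD enc x 0 :=
        lt_of_le_of_ne (hb x (List.mem_cons_self ..)) (fun h => he h.symm)
      rw [ih _ [x + 1] (PySem.List.pyGetD enc x 0) hptail hgex]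
      have hfe : (x :: xs).filter (fun y => decide (PySem.List.pyGetD enc y 0 = p)) = [] := by
        apply List.filter_eq_nil_iff.mpr
        intro z hz
        rcases List.mem_cons.mp hz with rfl | hz'
        · simpa using he
        · have := hgex z hz'; simp; omega
      have hfa : (x :: xs).filter (fun y => decide (PySem.List.pyGetD enc y 0 ≠ p)) = x :: xs := by
        apply List.filter_eq_self.mpr
        intro z hz
        rcases List.mem_cons.mp hz with rfl | hz'
        · simpa using he
        · have := hgex z hz'; simp; omega
      rw [hfe, hfa, runsOf_cons]
      have hp3 : (x :: xs).filter
          (fun y => decide (PySem.List.pyGetD enc y 0 = PySem.List.pyGetD enc x 0))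
          = x :: xs.filter
          (fun y => decide (PySem.List.pyGetD enc y 0 = PySem.List.pyGetD enc x 0)) := by
        rw [List.filter_cons]; simp
      rw [hp3, List.map_cons]
      simp only [List.map_nil, List.append_nil, List.singleton_append]
      conv_rhs => rw [List.filter_cons]
      by_cases hrb : run.length > 1
      · simp [hrb]
      · simp [hrb]

theorem getD_map_add_one (c : List Int) (j : Nat) (h : j < c.length) :
    (c.map (· + 1)).getD j 0 = c.getD j 0 + 1 := by
  rw [List.getD_eq_getElem _ _ (by simpa using h), List.getD_eq_getElem _ _ h, List.getElem_map]

theorem getD_bounds (N : Nat) (c : List Int) (hl : c.length = N)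
    (hb : ∀ x ∈ c, 0 ≤ x ∧ x < (N : Int)) (j : Nat) (hj : j < N) :
    0 ≤ c.getD j 0 ∧ c.getD j 0 < (N : Int) := by
  rw [List.getD_eq_getElem _ _ (by omega)]
  exact hb _ (List.getElem_mem _)

theorem head_mem_pyGetD (g : List Int) (hg : g ≠ []) : PySem.List.pyGetD g 0 0 ∈ g := by
  cases g with
  | nil => exact absurd rfl hg
  | cons a t =>
    have : PySem.List.pyGetD (a :: t) 0 0 = a := by
      unfold PySem.List.pyGetD
      rw [PySem.List.pyGet?_zero_cons]
      rfl
    rw [this]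
    exact List.mem_cons_self ..

set_option maxHeartbeats 4000000 in
theorem group_phase (N : Nat) (hN : 1 ≤ N) (c1 c2 c3 : List Int)
    (l1 : c1.length = N) (l2 : c2.length = N) (l3 : c3.length = N)
    (b1 : ∀ x ∈ c1, 0 ≤ x ∧ x < (N : Int))
    (b2 : ∀ x ∈ c2, 0 ≤ x ∧ x < (N : Int))
    (b3 : ∀ x ∈ c3, 0 ≤ x ∧ x < (N : Int)) :
    (let comp1 := c1.map (· + 1)
     let comp2 := c2.map (· + 1)
     let comp3 := c3.map (· + 1)
     let li := (PySem.List.pyRange 0 (N : Int) 1).foldl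
       (fun (d : PySem.Dict (Int × Int × Int) (List Int)) i =>
         d.modify (PySem.List.pyGetD comp1 i 0, PySem.List.pyGetD comp2 i 0,
                   PySem.List.pyGetD comp3 i 0) [] (· ++ [i + 1])) PySem.Dict.empty
     let awesome := li.values.foldl
       (fun acc g => if g.length > 1 then acc ++ [PySem.List.sorted g (fun x => x)] else acc) []
     PySem.List.sorted awesome (fun g => PySem.List.pyGetD g 0 0))
    = (let enc := (PySem.List.pyRange 0 (N : Int) 1).map
         (fun i => (PySem.List.pyGetD c1 i 0 * (N : Int) + PySem.List.pyGetD c2 i 0) * (N : Int) +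
                   PySem.List.pyGetD c3 i 0)
       let order := PySem.List.sorted (PySem.List.pyRange 0 (N : Int) 1)
         (fun i => PySem.List.pyGetD enc i 0)
       let fin := order.foldl (scanStep enc) ([], [], none)
       let groups := if fin.2.1.length > 1 then fin.1 ++ [fin.2.1] else fin.1
       PySem.List.sorted groups (fun g => PySem.List.pyGetD g 0 0)) := by
  dsimp only
  set K : Int → Int × Int × Int := fun i =>
    (PySem.List.pyGetD (c1.map (· + 1)) i 0, PySem.List.pyGetD (c2.map (· + 1)) i 0,
     PySem.List.pyGetD (c3.map (· + 1)) i 0) with hK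
  set f : Int → Int := fun i =>
    (PySem.List.pyGetD c1 i 0 * (N : Int) + PySem.List.pyGetD c2 i 0) * (N : Int) +
      PySem.List.pyGetD c3 i 0 with hf
  set idx := PySem.List.pyRange 0 (N : Int) 1 with hidx
  set enc := idx.map f with henc
  -- basic facts about idx
  have hidxeq : idx = List.map (fun k : Nat => (k : Int)) (List.range N) := by
    rw [hidx]; exact PySem.List.pyRange_zero_natCast N
  have hidx_mem : ∀ i ∈ idx, ∃ j : Nat, j < N ∧ i = (j : Int) := by
    intro i hi
    rw [hidxeq] at hi
    obtain ⟨j, hj, rfl⟩ := List.mem_map.mp hi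
    exact ⟨j, List.mem_range.mp hj, rfl⟩
  have hidx_pw : idx.Pairwise (· < ·) := by
    rw [hidxeq]
    exact (List.pairwise_map).mpr ((List.pairwise_lt_range).imp (fun h => by exact_mod_cast h))

  -- pointwise values of E and K on idx
  have hEj : ∀ j : Nat, j < N → PySem.List.pyGetD enc (j : Int) 0
      = (c1.getD j 0 * (N : Int) + c2.getD j 0) * (N : Int) + c3.getD j 0 := by
    intro j hj
    rw [henc, hidx, PySem.List.pyGetD_map_pyRange f N j 0 hj, hf]
    simp only [PySem.List.pyGetD_natCast]
  have hKj : ∀ j : Nat, j < N → K (j : Int)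
      = (c1.getD j 0 + 1, c2.getD j 0 + 1, c3.getD j 0 + 1) := by
    intro j hj
    rw [hK]
    simp only [PySem.List.pyGetD_natCast]
    rw [getD_map_add_one _ _ (by omega), getD_map_add_one _ _ (by omega),
        getD_map_add_one _ _ (by omega)]
  -- the two key functions induce the same equivalence on idx
  have hKE : ∀ i ∈ idx, ∀ i' ∈ idx,
      (K i = K i' ↔ PySem.List.pyGetD enc i 0 = PySem.List.pyGetD enc i' 0) := by
    intro i hi i' hi'
    obtain ⟨j, hj, rfl⟩ := hidx_mem i hi
    obtain ⟨j', hj', rfl⟩ := hidx_mem i' hi'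
    rw [hKj j hj, hKj j' hj', hEj j hj, hEj j' hj']
    have d1 := getD_bounds N c1 l1 b1 j hj
    have d2 := getD_bounds N c2 l2 b2 j hj
    have d3 := getD_bounds N c3 l3 b3 j hj
    have d1' := getD_bounds N c1 l1 b1 j' hj'
    have d2' := getD_bounds N c2 l2 b2 j' hj'
    have d3' := getD_bounds N c3 l3 b3 j' hj'
    constructor
    · intro h
      simp only [Prod.mk.injEq] at h
      obtain ⟨h1, h2, h3⟩ := h
      rw [show c1.getD j 0 = c1.getD j' 0 by omega, show c2.getD j 0 = c2.getD j' 0 by omega,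
          show c3.getD j 0 = c3.getD j' 0 by omega]
    · intro h
      have hNpos : (0 : Int) < (N : Int) := by exact_mod_cast hN
      have hc3 := cancel_digit (N : Int) _ _ _ _ hNpos d3.1 d3.2 d3'.1 d3'.2 h
      have hc12 := cancel_digit (N : Int) _ _ _ _ hNpos d2.1 d2.2 d2'.1 d2'.2 hc3.1
      simp only [Prod.mk.injEq]
      exact ⟨by omega, by omega, by omega⟩
  -- the per-key group of nodes
  set grp : Int × Int × Int → List Int :=
    fun k => (idx.filter (fun i => K i == k)).map (· + 1) with hgrp
  have hext : ∀ k y, y ∈ grp k → ∃ j, j ∈ idx ∧ K j = k ∧ y = j + 1 := by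
    intro k y hy
    rw [hgrp] at hy
    obtain ⟨j, hj, rfl⟩ := List.mem_map.mp hy
    have h := List.mem_filter.mp hj
    exact ⟨j, h.1, by simpa using h.2, rfl⟩
  have hin : ∀ k i, i ∈ idx → K i = k → i + 1 ∈ grp k := by
    intro k i hi hk
    rw [hgrp]
    exact List.mem_map.mpr ⟨i, List.mem_filter.mpr ⟨hi, by simp [hk]⟩, rfl⟩
  have hgrp_ne : ∀ i ∈ idx, grp (K i) ≠ [] := by
    intro i hi h
    have := hin (K i) i hi rfl
    rw [h] at this
    exact absurd this (List.not_mem_nil)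
  -- ===== A side =====
  have hdict_getD : ∀ k, ((idx.foldl
      (fun (d : PySem.Dict (Int × Int × Int) (List Int)) i => d.modify (K i) [] (· ++ [i + 1]))
      PySem.Dict.empty).getD k []) = grp k := by
    intro k
    have h1 : idx.foldl
        (fun (d : PySem.Dict (Int × Int × Int) (List Int)) i => d.modify (K i) [] (· ++ [i + 1]))
        PySem.Dict.empty
        = (idx.map (fun i => (K i, i + 1))).foldl
            (fun d p => d.modify p.1 [] (· ++ [p.2])) PySem.Dict.empty := by
      rw [List.foldl_map]
    rw [h1, PySem.Dict.getD_foldl_modify_append, hgrp]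
    rw [List.filter_map, List.map_map]
    simp [Function.comp_def, PySem.Dict.getD_empty]
  have hnodup_keys : ((idx.foldl
      (fun (d : PySem.Dict (Int × Int × Int) (List Int)) i => d.modify (K i) [] (· ++ [i + 1]))
      PySem.Dict.empty).keys).Nodup := by
    have := PySem.Dict.nodup_keys_foldl_modify_key idx K [] (fun _ i v => v ++ [i + 1])
      PySem.Dict.empty (by rw [PySem.Dict.keys_empty]; exact List.nodup_nil)
    exact this
  have hkeys : ((idx.foldl
      (fun (d : PySem.Dict (Int × Int × Int) (List Int)) i => d.modify (K i) [] (· ++ [i + 1]))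
      PySem.Dict.empty).keys) = PySem.Set.ofList (idx.map K) := by
    have h := PySem.Dict.keys_foldl_modify_key idx K [] (fun _ i v => v ++ [i + 1])
      PySem.Dict.empty
    rw [PySem.Dict.keys_empty] at h
    exact h
  have hvalues : ((idx.foldl
      (fun (d : PySem.Dict (Int × Int × Int) (List Int)) i => d.modify (K i) [] (· ++ [i + 1]))
      PySem.Dict.empty).values) = (PySem.Set.ofList (idx.map K)).map grp := by
    rw [PySem.Dict.values_eq_map_keys _ hnodup_keys ([] : List Int), hkeys]
    exact List.map_congr_left (fun k _ => hdict_getD k)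
  have hfn : (fun (acc : List (List Int)) (g : List Int) =>
        if g.length > 1 then acc ++ [PySem.List.sorted g (fun x => x)] else acc)
      = (fun acc g => if (fun (g : List Int) => decide (g.length > 1)) g = true
          then acc ++ [(fun (g : List Int) => PySem.List.sorted g (fun x => x)) g] else acc) := by
    funext acc g
    by_cases h : g.length > 1 <;> simp [h]
  have hApre : (((idx.foldl
      (fun (d : PySem.Dict (Int × Int × Int) (List Int)) i => d.modify (K i) [] (· ++ [i + 1]))
      PySem.Dict.empty).values).foldl
        (fun acc g => if g.length > 1 then acc ++ [PySem.List.sorted g (fun x => x)] else acc) [])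
      = (((PySem.Set.ofList (idx.map K)).map grp).filter
          (fun g => decide (g.length > 1))) := by
    rw [hfn, PySem.List.foldl_append_if, List.nil_append, hvalues]
    have hsid : ∀ g ∈ ((PySem.Set.ofList (idx.map K)).map grp).filter
        (fun g => decide (g.length > 1)), PySem.List.sorted g (fun x => x) = g := by
      intro g hg
      obtain ⟨k, _, rfl⟩ := List.mem_map.mp (List.mem_filter.mp hg).1
      apply PySem.List.sorted_eq_self_of_pairwise
      rw [hgrp]
      refine (List.pairwise_map).mpr ?_
      exact (hidx_pw.filter _).imp (fun h => by omega)
    rw [List.map_congr_left hsid]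
    simp
  set Apre := ((PySem.Set.ofList (idx.map K)).map grp).filter
      (fun g => decide (g.length > 1)) with hApredef
  have hApre_mem : ∀ g, g ∈ Apre ↔ (∃ i ∈ idx, g = grp (K i)) ∧ 1 < g.length := by
    intro g
    rw [hApredef, List.mem_filter]
    constructor
    · rintro ⟨hg1, hg2⟩
      obtain ⟨k, hk, rfl⟩ := List.mem_map.mp hg1
      obtain ⟨i, hi, rfl⟩ := List.mem_map.mp ((PySem.Set.mem_ofList _ _).mp hk)
      exact ⟨⟨i, hi, rfl⟩, by simpa using hg2⟩
    · rintro ⟨⟨i, hi, rfl⟩, hlen⟩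
      refine ⟨List.mem_map.mpr ⟨K i,
        (PySem.Set.mem_ofList _ _).mpr (List.mem_map.mpr ⟨i, hi, rfl⟩), rfl⟩, by simpa⟩
  have hA_nodup : Apre.Nodup := by
    rw [hApredef]
    apply List.Nodup.filter
    apply List.Nodup.map_on ?_ (PySem.Set.nodup_ofList _)
    intro k hk k' hk' hgg
    obtain ⟨i, hi, rfl⟩ := List.mem_map.mp ((PySem.Set.mem_ofList _ _).mp hk)
    have hmem : i + 1 ∈ grp k' := hgg ▸ hin (K i) i hi rfl
    obtain ⟨j, hj, hKj', hj1⟩ := hext k' _ hmem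
    have : j = i := by omega
    subst this
    exact hKj'
  -- ===== B side =====
  have horder_pw := PySem.List.sorted_pairwise idx (fun i => PySem.List.pyGetD enc i 0)
  have hBgroups :
      (if ((PySem.List.sorted idx (fun i => PySem.List.pyGetD enc i 0)).foldl
            (scanStep enc) ([], [], none)).2.1.length > 1
       then ((PySem.List.sorted idx (fun i => PySem.List.pyGetD enc i 0)).foldl
              (scanStep enc) ([], [], none)).1
            ++ [((PySem.List.sorted idx (fun i => PySem.List.pyGetD enc i 0)).foldl
                  (scanStep enc) ([], [], none)).2.1]
       else ((PySem.List.sorted idx (fun i => PySem.List.pyGetD enc i 0)).foldl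
              (scanStep enc) ([], [], none)).1)
      = (runsOf (fun i => PySem.List.pyGetD enc i 0)
          (PySem.List.sorted idx (fun i => PySem.List.pyGetD enc i 0))).filter
          (fun g => decide (g.length > 1)) := by
    rcases horderc : PySem.List.sorted idx (fun i => PySem.List.pyGetD enc i 0) with _ | ⟨x, rest⟩
    · simp [runsOf]
    · rw [horderc] at horder_pw
      rw [List.foldl_cons,
          show scanStep enc ([], [], none) x
            = ([], [x + 1], some (PySem.List.pyGetD enc x 0)) from rfl]
      have hb0 : ∀ y ∈ rest, PySem.List.pyGetD enc x 0 ≤ PySem.List.pyGetD enc y 0 :=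
        fun y hy => (List.pairwise_cons.mp horder_pw).1 y hy
      rw [scan_run enc rest [] [x + 1] (PySem.List.pyGetD enc x 0)
        (List.pairwise_cons.mp horder_pw).2 hb0]
      rw [runsOf_cons]
      have hp4 : (x :: rest).filter
          (fun y => decide (PySem.List.pyGetD enc y 0 = PySem.List.pyGetD enc x 0))
          = x :: rest.filter
          (fun y => decide (PySem.List.pyGetD enc y 0 = PySem.List.pyGetD enc x 0)) := by
        rw [List.filter_cons]; simp
      rw [hp4, List.map_cons]
      simp only [List.nil_append, List.singleton_append]
  have hrun_eq : ∀ x ∈ idx,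
      ((PySem.List.sorted idx (fun i => PySem.List.pyGetD enc i 0)).filter
        (fun y => decide (PySem.List.pyGetD enc y 0 = PySem.List.pyGetD enc x 0))).map (· + 1)
      = grp (K x) := by
    intro x hx
    rw [sorted_filter_key idx (fun i => PySem.List.pyGetD enc i 0) (PySem.List.pyGetD enc x 0)]
    rw [hgrp]
    congr 1
    apply List.filter_congr
    intro y hy
    have hiff := hKE y hy x hx
    by_cases h : K y = K x
    · simp [h, hiff.mp h]
    · have hne : ¬ (PySem.List.pyGetD enc y 0 = PySem.List.pyGetD enc x 0) :=
        fun he => h (hiff.mpr he)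
    
      simp [h, hne]
  set Bpre := (runsOf (fun i => PySem.List.pyGetD enc i 0)
      (PySem.List.sorted idx (fun i => PySem.List.pyGetD enc i 0))).filter
      (fun g => decide (g.length > 1)) with hBpredef
  have hB_nodup : Bpre.Nodup := List.Nodup.filter _ (nodup_runsOf _ _)
  have hBpre_mem : ∀ g, g ∈ Bpre ↔ (∃ i ∈ idx, g = grp (K i)) ∧ 1 < g.length := by
    intro g
    rw [hBpredef, List.mem_filter]
    constructor
    · rintro ⟨hg1, hg2⟩
      obtain ⟨x, hx, rfl⟩ := (mem_runsOf _ _ _).mp hg1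
      have hx' : x ∈ idx := (PySem.List.mem_sorted _ _ _ _).mp hx
      exact ⟨⟨x, hx', (hrun_eq x hx')⟩, by simpa using hg2⟩
    · rintro ⟨⟨i, hi, rfl⟩, hlen⟩
      refine ⟨(mem_runsOf _ _ _).mpr
        ⟨i, (PySem.List.mem_sorted _ _ _ _).mpr hi, (hrun_eq i hi).symm⟩, by simpa⟩
  -- ===== combine =====
  have hAB : ∀ g, g ∈ Apre ↔ g ∈ Bpre := by
    intro g
    rw [hApre_mem, hBpre_mem]
  have hperm : Apre.Perm Bpre := (List.perm_ext_iff_of_nodup hA_nodup hB_nodup).mpr hAB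
  have hheads : ∀ g ∈ Apre, ∀ g' ∈ Apre,
      PySem.List.pyGetD g 0 0 = PySem.List.pyGetD g' 0 0 → g = g' := by
    intro g hg g' hg' hh
    obtain ⟨⟨i, hi, rfl⟩, _⟩ := (hApre_mem g).mp hg
    obtain ⟨⟨i', hi', rfl⟩, _⟩ := (hApre_mem g').mp hg'
    have hm : PySem.List.pyGetD (grp (K i)) 0 0 ∈ grp (K i) :=
      head_mem_pyGetD _ (hgrp_ne i hi)
    have hm' : PySem.List.pyGetD (grp (K i)) 0 0 ∈ grp (K i') := by
      rw [hh]
      exact head_mem_pyGetD _ (hgrp_ne i' hi')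
    obtain ⟨j, hj, hKj1, hj1⟩ := hext _ _ hm
    obtain ⟨j', hj', hKj2, hj2⟩ := hext _ _ hm'
    have : j = j' := by omega
    subst this
    rw [← hKj1, ← hKj2]
  have hS := PySem.List.sorted_perm Apre (fun g => PySem.List.pyGetD g 0 0) false
  have hSpw := PySem.List.sorted_pairwise Apre (fun g => PySem.List.pyGetD g 0 0)
  have hSnodup : (PySem.List.sorted Apre (fun g => PySem.List.pyGetD g 0 0)).Nodup :=
    hS.nodup_iff.mpr hA_nodup
  have hSlt : (PySem.List.sorted Apre (fun g => PySem.List.pyGetD g 0 0)).Pairwise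
      (fun g g' => PySem.List.pyGetD g 0 0 < PySem.List.pyGetD g' 0 0) := by
    refine (hSpw.and hSnodup).imp_of_mem ?_
    intro a b ha hb hr
    refine lt_of_le_of_ne hr.1 (fun he => hr.2 ?_)
    exact hheads a (hS.mem_iff.mp ha) b (hS.mem_iff.mp hb) he
  have hfinal : PySem.List.sorted Bpre (fun g => PySem.List.pyGetD g 0 0)
      = PySem.List.sorted Apre (fun g => PySem.List.pyGetD g 0 0) :=
    PySem.List.sorted_eq_of_perm_of_pairwise_lt Bpre _ _ (hS.trans hperm) hSlt
  rw [hApre, hBgroups]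
  exact hfinal.symm

-- ===== VERDICT (by name: the statement is the Claim_ definition above) =====
theorem solve_spec : Claim_equal_solve := by
  intro n e1 e2 e3 _hdom hpre
  unfold Spec_solve
  by_cases hn : 0 < n
  · have h0 : n = ((n.toNat : Nat) : Int) := (Int.toNat_of_nonneg hn.le).symm
    have hN : 1 ≤ n.toNat := by omega
    rw [h0]
    have h1 := dsu_bnd n.toNat hN e1
    have h2 := dsu_bnd n.toNat hN e2
    have h3 := dsu_bnd n.toNat hN e3
    exact group_phase n.toNat hN (dsu (n.toNat : Int) e1) (dsu (n.toNat : Int) e2)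
      (dsu (n.toNat : Int) e3) h1.1 h2.1 h3.1 h1.2 h2.2 h3.2
  · have hnil : PySem.List.pyRange 0 n 1 = [] := by
      simp [PySem.List.pyRange, hn]
    unfold Pre_solve at hpre
    have hall : ∀ p ∈ e1 ++ e2 ++ e3, 1 - n ≤ p.1 ∧ p.1 ≤ n ∧ 1 - n ≤ p.2 ∧ p.2 ≤ n := by
      intro p hp
      have := List.all_eq_true.mp hpre p hp
      simpa using this
    have he1 : e1 = [] := by
      cases e1 with
      | nil => rfl
      | cons p t => exact absurd (hall p (by simp)) (by omega)
    have he2 : e2 = [] := by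
      cases e2 with
      | nil => rfl
      | cons p t => exact absurd (hall p (by simp)) (by omega)
    have he3 : e3 = [] := by
      cases e3 with
      | nil => rfl
      | cons p t => exact absurd (hall p (by simp)) (by omega)
    subst he1; subst he2; subst he3
    simp only [solve, solve_alt, dsu, hnil]
    rfl
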